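-- pv_equiv track=rewrite | github.com/pypi-data/pypi-mirror-279 | packages/p-vs-np/p_vs_np-1.0.0-py3-none-any.whl/p_vs_np/database_problems/Square-Tiling.py | can_tile
-- ===== SOURCE A (Python) =====
-- def can_tile(grid):
--     # Check if the grid can be tiled with dominos
--
--     # Base case: all cells are covered
--     if all(all(cell == 1 for cell in row) for row in grid):
--         return True
--
--     # Find the first empty cell
--     for i in range(len(grid)):
--         for j in range(len(grid[0])):
--             if grid[i][j] == 0:
--                 # Check horizontal placement
--                 if i < len(grid) - 1 and grid[i + 1][j] == 0:
--                     grid[i][j] = grid[i + 1][j] = 1  # Place horizontal domino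
--                     if can_tile(grid):  # Recurse on the modified grid
--                         return True
--                     grid[i][j] = grid[i + 1][j] = 0  # Reset grid
--
--                 # Check vertical placement
--                 if j < len(grid[0]) - 1 and grid[i][j + 1] == 0:
--                     grid[i][j] = grid[i][j + 1] = 1  # Place vertical domino
--                     if can_tile(grid):  # Recurse on the modified grid
--                         return True
--                     grid[i][j] = grid[i][j + 1] = 0  # Reset grid
--
--                 return False  # No valid placement found
--
--     return True  # All cells are already covered
-- ===== SOURCE B (Python) =====
-- def can_tile(grid):
--     # Top-down dynamic programming over the set of still-empty cells:
--     # cover the row-major-first empty cell by a domino going down or right,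
--     # memoising the result per set of empty cells, so no identical
--     # subproblem is searched twice.
--     cols = len(grid[0]) if grid else 0
--     cells = frozenset((i, j)
--                       for i in range(len(grid))
--                       for j in range(cols)
--                       if grid[i][j] == 0)
--     memo = {}
--
--     def solve(cs):
--         if not cs:
--             return True
--         cached = memo.get(cs)
--         if cached is not None:
--             return cached
--         i, j = min(cs)
--         r = False
--         if (i + 1, j) in cs and solve(cs - {(i, j), (i + 1, j)}):
--             r = True
--         elif (i, j + 1) in cs and solve(cs - {(i, j), (i, j + 1)}):
--             r = True
--         memo[cs] = r
--         return r
--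
--     return solve(cells)
-- ===== Notes on version B (the rewrite author's own statement) =====
-- stated objective: alternative
-- what changed: B replaces A's backtracking over a mutable grid (which rescans the whole grid at every node) by top-down dynamic programming: recursion over the frozenset of still-empty cells, always covering the row-major-first empty cell, with results memoised per set of empty cells so no identical subproblem is searched twice.
-- outside the precondition, e.g. on can_tile([[0, 0], [1]]): A returns True, B raises IndexError
import Mathlib
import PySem

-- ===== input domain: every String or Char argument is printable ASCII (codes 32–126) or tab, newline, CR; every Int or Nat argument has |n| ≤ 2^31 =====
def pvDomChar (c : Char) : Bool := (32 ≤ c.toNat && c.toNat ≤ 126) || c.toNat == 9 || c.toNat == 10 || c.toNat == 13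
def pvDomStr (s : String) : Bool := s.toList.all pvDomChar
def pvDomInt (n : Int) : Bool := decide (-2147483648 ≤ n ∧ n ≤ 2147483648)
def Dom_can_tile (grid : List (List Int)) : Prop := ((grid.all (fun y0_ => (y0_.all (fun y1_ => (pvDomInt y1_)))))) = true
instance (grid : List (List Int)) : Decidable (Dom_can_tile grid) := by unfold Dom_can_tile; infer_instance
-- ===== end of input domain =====

-- B replaces A's backtracking on a mutable grid by memoised top-down dynamic
-- programming over the set of still-empty cells (objective: alternative).
-- A mutates its argument in place (and can leave placed dominoes in it when it
-- returns True); the equivalence proved here is about the RETURN value only.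

-- ===== PORT A =====

-- grid[i][j] (indices produced by in-range scans; default never observed inside Pre_)
def pvCellA (grid : List (List Int)) (i j : Nat) : Int := (grid.getD i []).getD j 0

-- grid[i][j] = 1
def pvPlace (grid : List (List Int)) (i j : Nat) : List (List Int) :=
  grid.set i ((grid.getD i []).set j 1)

-- inner loop `for j in range(len(grid[0])): if grid[i][j] == 0: …` — first j with a zero, scanning c cells from j
def pvFindZeroRow (row : List Int) : Nat → Nat → Option Nat
  | 0, _ => none
  | c + 1, j => if row.getD j 0 == 0 then some j else pvFindZeroRow row c (j + 1)

-- outer loop `for i in range(len(grid))` — first (i, j) with grid[i][j] == 0, scanning r rows from i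
def pvFindZero (grid : List (List Int)) (C : Nat) : Nat → Nat → Option (Nat × Nat)
  | 0, _ => none
  | r + 1, i =>
    match pvFindZeroRow (grid.getD i []) C 0 with
    | some j => some (i, j)
    | none => pvFindZero grid C r (i + 1)

-- the recursive body of A; the fuel only makes the recursion structural (A strictly
-- shrinks the set of zero cells on every call, so sufficient fuel is never exhausted)
def pvTileA : Nat → List (List Int) → Bool
  | 0, _ => false
  | fuel + 1, grid =>
    if grid.all (fun row => row.all (fun c => c == 1)) then true
    else
      match pvFindZero grid (grid.headD []).length grid.length 0 with
      | none => true
      | some (i, j) =>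
        if (decide (i < grid.length - 1) && (pvCellA grid (i + 1) j == 0)) &&
            pvTileA fuel (pvPlace (pvPlace grid i j) (i + 1) j) then true
        else if (decide (j < (grid.headD []).length - 1) && (pvCellA grid i (j + 1) == 0)) &&
            pvTileA fuel (pvPlace (pvPlace grid i j) i (j + 1)) then true
        else false

def can_tile (grid : List (List Int)) : Bool :=
  pvTileA ((grid.map List.length).sum + 1) grid

-- ===== PORT B =====

-- min(cs) on distinct int pairs: lexicographic minimum (hand-ported fold, exact)
def pvLexLt (a b : Int × Int) : Bool := a.1 < b.1 || (a.1 == b.1 && a.2 < b.2)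

def pvMinPair : List (Int × Int) → Int × Int
  | [] => (0, 0)      -- unreachable: callers guard on emptiness
  | x :: xs => xs.foldl (fun a b => if pvLexLt b a then b else a) x

-- frozenset((i, j) for i in range(len(grid)) for j in range(cols) if grid[i][j] == 0)
def pvCells (grid : List (List Int)) : List (Int × Int) :=
  PySem.Set.ofList ((List.range grid.length).flatMap (fun i =>
    (List.range (grid.headD []).length).filterMap (fun j =>
      if (grid.getD i []).getD j 0 == 0 then some ((i : Int), (j : Int)) else none)))

-- solve(cs) with the memo dict threaded through; `cs - {a, b}` is ported as
-- (cs.erase a).erase b — exact for a duplicate-free cs, which every reachable cs is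
def pvSolveB : Nat → PySem.Dict (List (Int × Int)) Bool → List (Int × Int) →
    Bool × PySem.Dict (List (Int × Int)) Bool
  | fuel, memo, cs =>
    if cs.isEmpty then (true, memo)
    else
      match memo.get? cs with
      | some r => (r, memo)
      | none =>
        match fuel with
        | 0 => (false, memo)     -- fuel guard only, never reached from can_tile_alt
        | fuel + 1 =>
          let m := pvMinPair cs
          let down :=
            if cs.contains (m.1 + 1, m.2) then
              pvSolveB fuel memo ((cs.erase m).erase (m.1 + 1, m.2))
            else (false, memo)
          if down.1 then (true, down.2.insert cs true)
          else
            let right :=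
              if cs.contains (m.1, m.2 + 1) then
                pvSolveB fuel down.2 ((cs.erase m).erase (m.1, m.2 + 1))
              else (false, down.2)
            (right.1, right.2.insert cs right.1)

def can_tile_alt (grid : List (List Int)) : Bool :=
  (pvSolveB (pvCells grid).length PySem.Dict.empty (pvCells grid)).1

-- ===== PRECONDITION & SPEC =====

-- Pre_ excludes grids in which some row is shorter than the first row: A reads
-- grid[i][j] for j < len(grid[0]) in every row it scans and raises IndexError on
-- (almost all of) them, and B always raises IndexError there; see claim cites.
def Pre_can_tile (grid : List (List Int)) : Prop :=
  ∀ row ∈ grid, (grid.headD []).length ≤ row.length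

instance (grid : List (List Int)) : Decidable (Pre_can_tile grid) := by
  unfold Pre_can_tile; infer_instance

def pvWitness_can_tile : List (List Int) := [[0, 0], [0, 0]]

def Spec_can_tile (grid : List (List Int)) (out : Bool) : Prop := out = can_tile_alt grid
instance (grid : List (List Int)) (out : Bool) : Decidable (Spec_can_tile grid out) := by
  unfold Spec_can_tile; infer_instance

-- ===== CLAIM (what is proved, stated in full; the proofs are below) =====
def Claim_equal_can_tile : Prop :=
  ∀ (grid : List (List Int)), Dom_can_tile grid → Pre_can_tile grid →
    Spec_can_tile grid (can_tile grid)

-- ===== LEMMAS AND PROOFS =====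

-- lexicographic strict order on pairs (the order min() uses on distinct tuples)
def pLt (a b : Int × Int) : Prop := a.1 < b.1 ∨ (a.1 = b.1 ∧ a.2 < b.2)

-- row-major list of empty cells, before set()-normalisation
def pvCellsRaw (grid : List (List Int)) : List (Int × Int) :=
  (List.range grid.length).flatMap (fun i =>
    (List.range (grid.headD []).length).filterMap (fun j =>
      if (grid.getD i []).getD j 0 == 0 then some ((i : Int), (j : Int)) else none))

-- memoless reference recursion (proof skeleton shared by both ports)
def pvSolveP : Nat → List (Int × Int) → Bool
  | _, [] => true
  | 0, _ :: _ => false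
  | fuel + 1, x :: t =>
    ((x :: t).contains ((pvMinPair (x :: t)).1 + 1, (pvMinPair (x :: t)).2) &&
      pvSolveP fuel (((x :: t).erase (pvMinPair (x :: t))).erase
        ((pvMinPair (x :: t)).1 + 1, (pvMinPair (x :: t)).2))) ||
    ((x :: t).contains ((pvMinPair (x :: t)).1, (pvMinPair (x :: t)).2 + 1) &&
      pvSolveP fuel (((x :: t).erase (pvMinPair (x :: t))).erase
        ((pvMinPair (x :: t)).1, (pvMinPair (x :: t)).2 + 1)))

-- --- basic facts about the cell list ---

lemma cellEntry_eq {row : List Int} {i j : Nat} {b : Int × Int}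
    (h : (if row.getD j 0 == 0 then some ((i : Int), (j : Int)) else none) = some b) :
    b = ((i : Int), (j : Int)) := by
  split_ifs at h
  exact (Option.some.inj h).symm

lemma mem_pvCellsRaw {grid : List (List Int)} {p : Int × Int} :
    p ∈ pvCellsRaw grid ↔ ∃ i j : Nat, i < grid.length ∧ j < (grid.headD []).length ∧
      (grid.getD i []).getD j 0 = 0 ∧ p = ((i : Int), (j : Int)) := by
  simp only [pvCellsRaw, List.mem_flatMap, List.mem_filterMap, List.mem_range]
  constructor
  · rintro ⟨i, hi, j, hj, hsome⟩
    split_ifs at hsome with h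
    exact ⟨i, j, hi, hj, by simpa using h, (Option.some.inj hsome).symm⟩
  · rintro ⟨i, j, hi, hj, h0, rfl⟩
    refine ⟨i, hi, j, hj, ?_⟩
    rw [if_pos (by simpa using h0)]

lemma pLt_asymm {a b : Int × Int} (h : pLt a b) : ¬ pLt b a := by
  rcases a with ⟨a1, a2⟩; rcases b with ⟨b1, b2⟩
  simp only [pLt] at *; omega

lemma pLt_ne {a b : Int × Int} (h : pLt a b) : a ≠ b := by
  rcases a with ⟨a1, a2⟩; rcases b with ⟨b1, b2⟩
  simp only [pLt] at h; intro he
  injection he with h1 h2; omega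

lemma pairwise_pvCellsRaw (grid : List (List Int)) : (pvCellsRaw grid).Pairwise pLt := by
  unfold pvCellsRaw
  rw [List.pairwise_flatMap]
  constructor
  · intro i _
    rw [List.pairwise_filterMap]
    refine List.Pairwise.imp ?_ List.pairwise_lt_range
    intro j j' hlt b hb b' hb'
    obtain rfl := cellEntry_eq hb
    obtain rfl := cellEntry_eq hb'
    exact Or.inr ⟨rfl, by change (j : Int) < (j' : Int); exact_mod_cast hlt⟩
  · refine List.Pairwise.imp ?_ List.pairwise_lt_range
    intro i i' hlt x hx y hy
    simp only [List.mem_filterMap, List.mem_range] at hx hy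
    obtain ⟨j, _, hj⟩ := hx; obtain ⟨j', _, hj'⟩ := hy
    obtain rfl := cellEntry_eq hj
    obtain rfl := cellEntry_eq hj'
    exact Or.inl (by change (i : Int) < (i' : Int); exact_mod_cast hlt)

lemma nodup_pvCellsRaw (grid : List (List Int)) : (pvCellsRaw grid).Nodup :=
  (pairwise_pvCellsRaw grid).imp (fun h => pLt_ne h)

lemma foldl_add_of_nodup {α : Type} [BEq α] [LawfulBEq α] :
    ∀ (l acc : List α), (acc ++ l).Nodup → l.foldl PySem.Set.add acc = acc ++ l := by
  intro l
  induction l with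
  | nil => intro acc _; simp
  | cons x t ih =>
    intro acc h
    have hx : x ∉ acc := by
      intro hmem
      have := List.disjoint_of_nodup_append h hmem
      simp at this
    have hadd : PySem.Set.add acc x = acc ++ [x] := by
      simp [PySem.Set.add, PySem.Set.contains, hx]
    rw [List.foldl_cons, hadd, ih (acc ++ [x]) (by simpa using h)]
    simp

lemma pvCells_eq (grid : List (List Int)) : pvCells grid = pvCellsRaw grid := by
  have h := foldl_add_of_nodup (pvCellsRaw grid) [] (by simpa using nodup_pvCellsRaw grid)
  simpa [pvCells, pvCellsRaw, PySem.Set.ofList_eq_foldl] using h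

-- --- min() of the set ---

lemma pvLexLt_iff {a b : Int × Int} : pvLexLt a b = true ↔ pLt a b := by
  rcases a with ⟨a1, a2⟩; rcases b with ⟨b1, b2⟩
  simp [pvLexLt, pLt]

lemma foldl_min_of_min :
    ∀ (t : List (Int × Int)) (x : Int × Int), (∀ y ∈ t, pLt x y) →
      t.foldl (fun a b => if pvLexLt b a then b else a) x = x := by
  intro t
  induction t with
  | nil => intro x _; rfl
  | cons b t ih =>
    intro x h
    have hb : ¬ (pvLexLt b x = true) := fun h' =>
      pLt_asymm (h b (by simp)) (pvLexLt_iff.mp h')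
    rw [List.foldl_cons, if_neg hb]
    exact ih x (fun y hy => h y (by simp [hy]))

lemma pvMinPair_cons_of_min {x : Int × Int} {xs : List (Int × Int)}
    (h : ∀ y ∈ xs, pLt x y) : pvMinPair (x :: xs) = x :=
  foldl_min_of_min xs x h

lemma pvMinPair_mem : ∀ {cs : List (Int × Int)}, cs ≠ [] → pvMinPair cs ∈ cs := by
  intro cs h
  match cs with
  | x :: xs =>
    have key : ∀ (t : List (Int × Int)) (a : Int × Int),
        t.foldl (fun a b => if pvLexLt b a then b else a) a = a ∨
        t.foldl (fun a b => if pvLexLt b a then b else a) a ∈ t := by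
      intro t
      induction t with
      | nil => intro a; left; rfl
      | cons b t ih =>
        intro a
        rw [List.foldl_cons]
        by_cases hb : pvLexLt b a = true
        · rcases ih b with h' | h' <;> simp [hb, h']
        · rcases ih a with h' | h' <;> simp [hb, h']
    rcases key xs x with h' | h' <;> simp [pvMinPair, h']

-- --- the scan of port A finds the lexicographically first empty cell ---

lemma pvFindZeroRow_none {row : List Int} :
    ∀ (c j : Nat), pvFindZeroRow row c j = none →
      ∀ t, j ≤ t → t < j + c → row.getD t 0 ≠ 0 := by
  intro c
  induction c with
  | zero => intro j _ t h1 h2; omega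
  | succ c ih =>
    intro j h t h1 h2
    unfold pvFindZeroRow at h
    split_ifs at h with hz
    rcases Nat.eq_or_lt_of_le h1 with rfl | h1'
    · simpa using hz
    · exact ih (j + 1) h t h1' (by omega)

lemma pvFindZeroRow_some {row : List Int} :
    ∀ (c j j' : Nat), pvFindZeroRow row c j = some j' →
      j ≤ j' ∧ j' < j + c ∧ row.getD j' 0 = 0 ∧ ∀ t, j ≤ t → t < j' → row.getD t 0 ≠ 0 := by
  intro c
  induction c with
  | zero => intro j j' h; simp [pvFindZeroRow] at h
  | succ c ih =>
    intro j j' h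
    unfold pvFindZeroRow at h
    split_ifs at h with hz
    · obtain rfl := Option.some.inj h
      exact ⟨le_refl _, by omega, by simpa using hz, fun t h1 h2 => by omega⟩
    · obtain ⟨h1, h2, h3, h4⟩ := ih (j + 1) j' h
      refine ⟨by omega, by omega, h3, ?_⟩
      intro t ht1 ht2
      rcases Nat.eq_or_lt_of_le ht1 with rfl | ht1'
      · simpa using hz
      · exact h4 t ht1' ht2

lemma pvFindZero_none {grid : List (List Int)} {C : Nat} :
    ∀ (r i : Nat), pvFindZero grid C r i = none →
      ∀ t j, i ≤ t → t < i + r → j < C → (grid.getD t []).getD j 0 ≠ 0 := by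
  intro r
  induction r with
  | zero => intro i _ t j h1 h2; omega
  | succ r ih =>
    intro i h t j h1 h2 hj
    unfold pvFindZero at h
    rcases hrow : pvFindZeroRow (grid.getD i []) C 0 with _ | jz
    · rw [hrow] at h
      rcases Nat.eq_or_lt_of_le h1 with rfl | h1'
      · exact pvFindZeroRow_none C 0 hrow j (Nat.zero_le _) (by omega)
      · exact ih (i + 1) h t j h1' (by omega) hj
    · rw [hrow] at h; simp at h

lemma pvFindZero_some {grid : List (List Int)} {C : Nat} :
    ∀ (r i a b : Nat), pvFindZero grid C r i = some (a, b) →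
      i ≤ a ∧ a < i + r ∧ b < C ∧ (grid.getD a []).getD b 0 = 0 ∧
      (∀ t j, i ≤ t → t < a → j < C → (grid.getD t []).getD j 0 ≠ 0) ∧
      (∀ j, j < b → (grid.getD a []).getD j 0 ≠ 0) := by
  intro r
  induction r with
  | zero => intro i a b h; simp [pvFindZero] at h
  | succ r ih =>
    intro i a b h
    unfold pvFindZero at h
    rcases hrow : pvFindZeroRow (grid.getD i []) C 0 with _ | jz
    · rw [hrow] at h
      obtain ⟨h1, h2, h3, h4, h5, h6⟩ := ih (i + 1) a b h
      refine ⟨by omega, by omega, h3, h4, ?_, h6⟩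
      intro t j ht1 ht2 hj
      rcases Nat.eq_or_lt_of_le ht1 with rfl | ht1'
      · exact pvFindZeroRow_none C 0 hrow j (Nat.zero_le _) (by omega)
      · exact h5 t j ht1' ht2 hj
    · rw [hrow] at h
      obtain ⟨rfl, rfl⟩ : i = a ∧ jz = b := by
        have := Option.some.inj h; exact ⟨congrArg Prod.fst this, congrArg Prod.snd this⟩
      obtain ⟨_, hb2, hb3, hb4⟩ := pvFindZeroRow_some C 0 jz hrow
      exact ⟨le_refl _, by omega, by omega, hb3, fun t j h1 h2 hj => by omega,
        fun j hj => hb4 j (Nat.zero_le _) hj⟩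

-- none-case: the grid has no empty cell at all
lemma cells_nil_of_findZero_none {grid : List (List Int)}
    (h : pvFindZero grid (grid.headD []).length grid.length 0 = none) :
    pvCellsRaw grid = [] := by
  rw [List.eq_nil_iff_forall_not_mem]
  intro p hp
  obtain ⟨i, j, hi, hj, h0, rfl⟩ := mem_pvCellsRaw.mp hp
  exact pvFindZero_none grid.length 0 h i j (Nat.zero_le _) (by omega) hj h0

-- some-case: the found cell heads the (sorted) cell list
lemma cells_cons_of_findZero_some {grid : List (List Int)} {a b : Nat}
    (h : pvFindZero grid (grid.headD []).length grid.length 0 = some (a, b)) :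
    ∃ rest, pvCellsRaw grid = ((a : Int), (b : Int)) :: rest := by
  obtain ⟨_, ha, hb, h0, hmin1, hmin2⟩ := pvFindZero_some grid.length 0 a b h
  have hmem : ((a : Int), (b : Int)) ∈ pvCellsRaw grid :=
    mem_pvCellsRaw.mpr ⟨a, b, by omega, hb, h0, rfl⟩
  have hmin : ∀ p ∈ pvCellsRaw grid, p = ((a : Int), (b : Int)) ∨ pLt ((a : Int), (b : Int)) p := by
    intro p hp
    obtain ⟨i, j, hi, hj, hz, rfl⟩ := mem_pvCellsRaw.mp hp
    rcases Nat.lt_trichotomy i a with hia | rfl | hia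
    · exact absurd hz (hmin1 i j (Nat.zero_le _) hia hj)
    · rcases Nat.lt_trichotomy j b with hjb | rfl | hjb
      · exact absurd hz (hmin2 j hjb)
      · exact Or.inl rfl
      · exact Or.inr (Or.inr ⟨rfl, by change (b : Int) < (j : Int); exact_mod_cast hjb⟩)
    · exact Or.inr (Or.inl (by change (a : Int) < (i : Int); exact_mod_cast hia))
  rcases hcells : pvCellsRaw grid with _ | ⟨y, ys⟩
  · rw [hcells] at hmem; simp at hmem
  · have hpw := pairwise_pvCellsRaw grid
    rw [hcells] at hpw hmem hmin
    rcases hmin y (by simp) with hy | hy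
    · exact ⟨ys, by rw [hy]⟩
    · exfalso
      rcases List.mem_cons.mp hmem with he | hm
      · exact pLt_ne hy he
      · exact pLt_asymm hy ((List.pairwise_cons.mp hpw).1 _ hm)

-- --- placing a domino half: effect on the grid and on the cell list ---

lemma pvPlace_length (grid : List (List Int)) (i j : Nat) :
    (pvPlace grid i j).length = grid.length := by simp [pvPlace]

lemma pvPlace_row_ne {grid : List (List Int)} {i k : Nat} (j : Nat) (h : i ≠ k) :
    (pvPlace grid i j).getD k [] = grid.getD k [] := by
  simp [pvPlace, List.getD_eq_getElem?_getD, List.getElem?_set_ne h]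

lemma pvPlace_row_self {grid : List (List Int)} {i : Nat} (j : Nat) (h : i < grid.length) :
    (pvPlace grid i j).getD i [] = (grid.getD i []).set j 1 := by
  simp [pvPlace, List.getD_eq_getElem?_getD, List.getElem?_set_self h]

lemma pvPlace_headLen {grid : List (List Int)} {i : Nat} (j : Nat) (hi : i < grid.length) :
    ((pvPlace grid i j).headD []).length = (grid.headD []).length := by
  have h0 : ∀ (g : List (List Int)), g.headD [] = g.getD 0 [] := by
    intro g; cases g <;> rfl
  rw [h0, h0]
  by_cases h : i = 0
  · subst h; rw [pvPlace_row_self j hi]; simp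
  · rw [pvPlace_row_ne j h]

lemma pvCellA_pvPlace_ne {grid : List (List Int)} {i j i' j' : Nat}
    (h : (i', j') ≠ (i, j)) : pvCellA (pvPlace grid i j) i' j' = pvCellA grid i' j' := by
  by_cases hi : i = i'
  · subst hi
    have hj : j' ≠ j := by intro he; exact h (by rw [he])
    by_cases hlen : i < grid.length
    · unfold pvCellA
      rw [pvPlace_row_self j hlen]
      simp [List.getD_eq_getElem?_getD, List.getElem?_set_ne (Ne.symm hj)]
    · unfold pvCellA pvPlace
      rw [List.set_eq_of_length_le (by omega)]
  · unfold pvCellA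
    rw [pvPlace_row_ne j hi]

lemma pre_pvPlace {grid : List (List Int)} {i j : Nat}
    (hpre : Pre_can_tile grid) (hi : i < grid.length) :
    Pre_can_tile (pvPlace grid i j) := by
  intro row hrow
  rw [pvPlace_headLen j hi]
  rcases List.mem_or_eq_of_mem_set hrow with h | rfl
  · exact hpre row h
  · rw [List.length_set]
    refine hpre (grid.getD i []) ?_
    rw [List.getD_eq_getElem grid [] hi]
    exact List.getElem_mem hi

-- the inner row after setting cell j to 1, as a filter of the old inner list
lemma row_cells_update {row : List Int} {i j : Nat}
    (hj : j < row.length) (h0 : row.getD j 0 = 0) :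
    ∀ (l : List Nat),
      l.filterMap (fun j' => if (row.set j 1).getD j' 0 == 0 then some ((i : Int), (j' : Int)) else none)
        = (l.filterMap (fun j' => if row.getD j' 0 == 0 then some ((i : Int), (j' : Int)) else none)).filter
            (fun x => x != ((i : Int), (j : Int))) := by
  intro l
  induction l with
  | nil => rfl
  | cons t l ih =>
    simp only [List.filterMap_cons]
    by_cases ht : t = j
    · subst ht
      have hnew : (row.set t 1).getD t 0 = 1 := by
        simp [List.getD_eq_getElem?_getD, List.getElem?_set_self hj]
      rw [if_neg (by rw [hnew]; decide), if_pos (by simpa using h0)]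
      rw [List.filter_cons, if_neg (by simp)]
      exact ih
    · have hsame : (row.set j 1).getD t 0 = row.getD t 0 := by
        simp [List.getD_eq_getElem?_getD, List.getElem?_set_ne (Ne.symm ht)]
      rw [hsame]
      by_cases hz : row.getD t 0 = 0
      · rw [if_pos (by simpa using hz)]
        rw [List.filter_cons, if_pos ?hne]
        case hne =>
          simp only [bne_iff_ne, ne_eq, Prod.mk.injEq, not_and]
          intro _ h2
          exact ht (by exact_mod_cast h2)
        exact congrArg _ ih
      · rw [if_neg (by simpa using hz)]
        exact ih

-- filter keeps a list none of whose elements is m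
lemma filter_ne_eq_self {l : List (Int × Int)} {m : Int × Int}
    (h : ∀ x ∈ l, x ≠ m) : l.filter (fun x => x != m) = l :=
  List.filter_eq_self.mpr (fun x hx => by simpa using h x hx)

-- setting an empty in-range cell to 1 erases exactly that cell from the cell list
lemma cells_pvPlace {grid : List (List Int)} {i j : Nat}
    (hpre : Pre_can_tile grid) (hi : i < grid.length) (hj : j < (grid.headD []).length)
    (h0 : pvCellA grid i j = 0) :
    pvCellsRaw (pvPlace grid i j) = (pvCellsRaw grid).erase ((i : Int), (j : Int)) := by
  rw [List.Nodup.erase_eq_filter (nodup_pvCellsRaw grid)]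
  unfold pvCellsRaw
  rw [List.filter_flatMap, pvPlace_length, pvPlace_headLen j hi]
  refine List.flatMap_congr ?_
  intro i' hi'
  rw [List.mem_range] at hi'
  by_cases h : i' = i
  · subst h
    rw [pvPlace_row_self j hi]
    have hrowlen : j < (grid.getD i' []).length := by
      refine lt_of_lt_of_le hj (hpre (grid.getD i' []) ?_)
      rw [List.getD_eq_getElem grid [] hi]
      exact List.getElem_mem hi
    exact row_cells_update hrowlen h0 (List.range (grid.headD []).length)
  · rw [pvPlace_row_ne _ (fun he => h he.symm)]
    rw [filter_ne_eq_self]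
    intro x hx
    rw [List.mem_filterMap] at hx
    obtain ⟨j', _, hj'⟩ := hx
    obtain rfl := cellEntry_eq hj'
    intro he
    injection he with h1 _
    exact h (by exact_mod_cast h1)

-- --- size bound: the cell list is shorter than the total cell count ---

lemma cells_length_lt {grid : List (List Int)} (hpre : Pre_can_tile grid) :
    (pvCellsRaw grid).length < (grid.map List.length).sum + 1 := by
  have h1 : (pvCellsRaw grid).length ≤ grid.length * (grid.headD []).length := by
    unfold pvCellsRaw
    rw [List.length_flatMap]
    have hgen : ∀ (l : List Nat) (f : Nat → Nat) (c : Nat), (∀ x ∈ l, f x ≤ c) →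
        (l.map f).sum ≤ l.length * c := by
      intro l f c h
      induction l with
      | nil => simp
      | cons a t ih =>
        simp only [List.map_cons, List.sum_cons, List.length_cons]
        calc f a + (t.map f).sum ≤ c + t.length * c :=
              Nat.add_le_add (h a (by simp)) (ih (fun x hx => h x (by simp [hx])))
          _ = (t.length + 1) * c := by ring
    refine le_trans (hgen (List.range grid.length) _ (grid.headD []).length ?_) (by simp)
    intro x _
    exact le_trans (List.length_filterMap_le _ _) (by simp)
  have h2 : grid.length * (grid.headD []).length ≤ (grid.map List.length).sum := by
    have hgen : ∀ (rows : List (List Int)) (c : Nat), (∀ r ∈ rows, c ≤ r.length) →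
        rows.length * c ≤ (rows.map List.length).sum := by
      intro rows c h
      induction rows with
      | nil => simp
      | cons a t ih =>
        simp only [List.map_cons, List.sum_cons, List.length_cons]
        calc (t.length + 1) * c = c + t.length * c := by ring
          _ ≤ a.length + (t.map List.length).sum :=
              Nat.add_le_add (h a (by simp)) (ih (fun x hx => h x (by simp [hx])))
    exact hgen grid _ hpre
  omega

-- --- fuel-independence of the reference recursion ---

lemma pvSolveP_nil (f : Nat) : pvSolveP f [] = true := by cases f <;> rfl

lemma pvSolveP_fuel :
    ∀ (f1 f2 : Nat) (cs : List (Int × Int)), cs.length ≤ f1 → cs.length ≤ f2 →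
      pvSolveP f1 cs = pvSolveP f2 cs := by
  intro f1
  induction f1 with
  | zero =>
    intro f2 cs h1 _
    have h : cs = [] := List.length_eq_zero_iff.mp (Nat.le_zero.mp h1)
    subst h; rw [pvSolveP_nil, pvSolveP_nil]
  | succ a ih =>
    intro f2 cs h1 h2
    rcases cs with _ | ⟨x, t⟩
    · rw [pvSolveP_nil, pvSolveP_nil]
    · rcases f2 with _ | b
      · simp at h2
      · have hmem : pvMinPair (x :: t) ∈ x :: t := pvMinPair_mem (by simp)
        have hl : ∀ m2 : Int × Int,
            (((x :: t).erase (pvMinPair (x :: t))).erase m2).length ≤ a ∧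
            (((x :: t).erase (pvMinPair (x :: t))).erase m2).length ≤ b := by
          intro m2
          have he1 : ((x :: t).erase (pvMinPair (x :: t))).length = t.length := by
            rw [List.length_erase_of_mem hmem]; simp
          have he2 := List.length_erase_le (l := (x :: t).erase (pvMinPair (x :: t)))
            (a := m2)
          simp only [List.length_cons] at h1 h2
          omega
        show pvSolveP (a + 1) (x :: t) = pvSolveP (b + 1) (x :: t)
        simp only [pvSolveP]
        rw [ih b _ (hl _).1 (hl _).2, ih b _ (hl _).1 (hl _).2]

-- --- base case: an all-ones grid has no empty cells ---

lemma cells_nil_of_all_one {grid : List (List Int)} (hpre : Pre_can_tile grid)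
    (h : grid.all (fun row => row.all (fun c => c == 1)) = true) :
    pvCellsRaw grid = [] := by
  rw [List.eq_nil_iff_forall_not_mem]
  intro p hp
  obtain ⟨i, j, hi, hj, h0, rfl⟩ := mem_pvCellsRaw.mp hp
  have hrow : grid.getD i [] ∈ grid := by
    rw [List.getD_eq_getElem grid [] hi]; exact List.getElem_mem hi
  have hjlen : j < (grid.getD i []).length := lt_of_lt_of_le hj (hpre _ hrow)
  have hall := (List.all_eq_true.mp ((List.all_eq_true.mp h) _ hrow)) _
    (List.getElem_mem hjlen)
  rw [List.getD_eq_getElem _ _ hjlen] at h0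
  rw [h0] at hall
  simp at hall

-- --- the two neighbour-membership tests agree with A's bounds-and-value tests ---

lemma contains_down_eq {grid : List (List Int)} {a b : Nat}
    (hb : b < (grid.headD []).length) :
    ((pvCellsRaw grid).contains ((a : Int) + 1, (b : Int)))
      = (decide (a < grid.length - 1) && (pvCellA grid (a + 1) b == 0)) := by
  rw [Bool.eq_iff_iff]
  simp only [List.contains_iff_mem, Bool.and_eq_true, decide_eq_true_eq, beq_iff_eq]
  rw [mem_pvCellsRaw]
  constructor
  · rintro ⟨i, j, hi, hj, h0, he⟩
    rw [Prod.mk.injEq] at he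
    obtain ⟨he1, he2⟩ := he
    have hia : i = a + 1 := by omega
    have hjb : j = b := by exact_mod_cast he2.symm
    subst hia; subst hjb
    exact ⟨by omega, h0⟩
  · rintro ⟨h1, h2⟩
    exact ⟨a + 1, b, by omega, hb, h2, by push_cast; ring_nf⟩

lemma contains_right_eq {grid : List (List Int)} {a b : Nat}
    (ha : a < grid.length) :
    ((pvCellsRaw grid).contains ((a : Int), (b : Int) + 1))
      = (decide (b < (grid.headD []).length - 1) && (pvCellA grid a (b + 1) == 0)) := by
  rw [Bool.eq_iff_iff]
  simp only [List.contains_iff_mem, Bool.and_eq_true, decide_eq_true_eq, beq_iff_eq]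
  rw [mem_pvCellsRaw]
  constructor
  · rintro ⟨i, j, hi, hj, h0, he⟩
    rw [Prod.mk.injEq] at he
    obtain ⟨he1, he2⟩ := he
    have hia : i = a := by exact_mod_cast he1.symm
    have hjb : j = b + 1 := by omega
    subst hia; subst hjb
    exact ⟨by omega, h0⟩
  · rintro ⟨h1, h2⟩
    exact ⟨a, b + 1, ha, by omega, h2, by push_cast; ring_nf⟩

-- the two cells of a domino, removed in sequence from the cell list
lemma cells_place2 {grid : List (List Int)} {a b a2 b2 : Nat}
    (hpre : Pre_can_tile grid) (ha : a < grid.length) (hb : b < (grid.headD []).length)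
    (h0 : pvCellA grid a b = 0)
    (hne : (a2, b2) ≠ (a, b)) (ha2 : a2 < grid.length) (hb2 : b2 < (grid.headD []).length)
    (h02 : pvCellA grid a2 b2 = 0) :
    pvCellsRaw (pvPlace (pvPlace grid a b) a2 b2)
      = ((pvCellsRaw grid).erase ((a : Int), (b : Int))).erase ((a2 : Int), (b2 : Int)) := by
  have step1 : pvCellsRaw (pvPlace grid a b) = (pvCellsRaw grid).erase ((a : Int), (b : Int)) :=
    cells_pvPlace hpre ha hb h0
  have hpre' : Pre_can_tile (pvPlace grid a b) := pre_pvPlace hpre ha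
  have step2 : pvCellsRaw (pvPlace (pvPlace grid a b) a2 b2)
      = (pvCellsRaw (pvPlace grid a b)).erase ((a2 : Int), (b2 : Int)) := by
    refine cells_pvPlace hpre' ?_ ?_ ?_
    · rw [pvPlace_length]; exact ha2
    · rw [pvPlace_headLen b ha]; exact hb2
    · rw [pvCellA_pvPlace_ne hne]; exact h02
  rw [step2, step1]

-- --- the bridge: A's backtracking equals the reference recursion on the cell list ---

lemma bridge :
    ∀ (fuel : Nat) (grid : List (List Int)), Pre_can_tile grid →
      (pvCellsRaw grid).length < fuel →
      pvTileA fuel grid = pvSolveP fuel (pvCellsRaw grid) := by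
  intro fuel
  induction fuel with
  | zero => intro grid _ hlen; omega
  | succ fuel ih =>
    intro grid hpre hlen
    simp only [pvTileA]
    by_cases hall : grid.all (fun row => row.all (fun c => c == 1)) = true
    · rw [if_pos hall, cells_nil_of_all_one hpre hall, pvSolveP_nil]
    · rw [if_neg hall]
      rcases hfz : pvFindZero grid (grid.headD []).length grid.length 0 with _ | ⟨a, b⟩
      · rw [cells_nil_of_findZero_none hfz, pvSolveP_nil]
      · obtain ⟨rest, hcells⟩ := cells_cons_of_findZero_some hfz
        obtain ⟨-, ha, hb, h0, -, -⟩ := pvFindZero_some grid.length 0 a b hfz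
        have ha' : a < grid.length := by omega
        have hmin : pvMinPair (((a : Int), (b : Int)) :: rest) = ((a : Int), (b : Int)) := by
          refine pvMinPair_cons_of_min ?_
          have hpw := pairwise_pvCellsRaw grid
          rw [hcells] at hpw
          exact (List.pairwise_cons.mp hpw).1
        have hd := contains_down_eq (grid := grid) (a := a) (b := b) hb
        have hr := contains_right_eq (grid := grid) (a := a) (b := b) ha'
        rw [hcells] at hd hr
        have hrestlen : rest.length < fuel := by
          rw [hcells] at hlen
          simp only [List.length_cons] at hlen
          omega
        rw [hcells]
        show _ = pvSolveP (fuel + 1) (((a : Int), (b : Int)) :: rest)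
        simp only [pvSolveP, hmin, List.erase_cons_head]
        rw [hd, hr]
        -- each recursive call of A matches the reference recursion on the erased list
        have hrec : ∀ (a2 b2 : Nat), (a2, b2) ≠ (a, b) → a2 < grid.length →
            b2 < (grid.headD []).length → pvCellA grid a2 b2 = 0 →
            pvTileA fuel (pvPlace (pvPlace grid a b) a2 b2)
              = pvSolveP fuel (rest.erase ((a2 : Int), (b2 : Int))) := by
          intro a2 b2 hne ha2 hb2 hv2
          have hcg := cells_place2 hpre ha' hb h0 hne ha2 hb2 hv2
          rw [hcells, List.erase_cons_head] at hcg
          have hpre2 : Pre_can_tile (pvPlace (pvPlace grid a b) a2 b2) := by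
            refine pre_pvPlace (pre_pvPlace hpre ha') ?_
            rw [pvPlace_length]; exact ha2
          have hlen2 : (pvCellsRaw (pvPlace (pvPlace grid a b) a2 b2)).length < fuel := by
            rw [hcg]
            exact lt_of_le_of_lt List.length_erase_le hrestlen
          rw [ih _ hpre2 hlen2, hcg]
        -- the second (right-neighbour) branch, equal on both sides
        have hsecond :
            (if (decide (b < (grid.headD []).length - 1) && (pvCellA grid a (b + 1) == 0)) &&
                pvTileA fuel (pvPlace (pvPlace grid a b) a (b + 1)) then true else false)
              = ((decide (b < (grid.headD []).length - 1) && (pvCellA grid a (b + 1) == 0)) &&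
                  pvSolveP fuel (rest.erase ((a : Int), (b : Int) + 1))) := by
          by_cases hc2 : (decide (b < (grid.headD []).length - 1) &&
              (pvCellA grid a (b + 1) == 0)) = true
          · have hc2' := hc2
            rw [Bool.and_eq_true, decide_eq_true_eq, beq_iff_eq] at hc2'
            obtain ⟨hlt2, hv2⟩ := hc2'
            have hr2 := hrec a (b + 1) (by simp) ha' (by omega) hv2
            push_cast at hr2
            rw [hc2, hr2]
            cases hb2v : pvSolveP fuel (rest.erase ((a : Int), (b : Int) + 1)) <;> simp
          · rw [Bool.not_eq_true] at hc2
            rw [hc2]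
            simp
        by_cases hc1 : (decide (a < grid.length - 1) && (pvCellA grid (a + 1) b == 0)) = true
        · have hc1' := hc1
          rw [Bool.and_eq_true, decide_eq_true_eq, beq_iff_eq] at hc1'
          obtain ⟨hlt1, hv1⟩ := hc1'
          have hr1 := hrec (a + 1) b (by simp) (by omega) hb hv1
          push_cast at hr1
          rw [hc1, hr1]
          cases hb1 : pvSolveP fuel (rest.erase ((a : Int) + 1, (b : Int)))
          · rw [if_neg (by simp), Bool.and_false, Bool.false_or]
            exact hsecond
          · simp
        · rw [Bool.not_eq_true] at hc1
          rw [hc1]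
          rw [if_neg (by simp), Bool.false_and, Bool.false_or]
          exact hsecond

-- --- the memo table only ever stores correct results ---

def pvMemoOK (memo : PySem.Dict (List (Int × Int)) Bool) : Prop :=
  ∀ cs r, memo.get? cs = some r → r = pvSolveP cs.length cs

lemma solveB_ok :
    ∀ (fuel : Nat) (memo : PySem.Dict (List (Int × Int)) Bool) (cs : List (Int × Int)),
      pvMemoOK memo → cs.length ≤ fuel →
      (pvSolveB fuel memo cs).1 = pvSolveP fuel cs ∧ pvMemoOK (pvSolveB fuel memo cs).2 := by
  intro fuel
  induction fuel with
  | zero =>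
    intro memo cs hm hlen
    have h : cs = [] := List.length_eq_zero_iff.mp (Nat.le_zero.mp hlen)
    subst h
    exact ⟨by simp [pvSolveB, pvSolveP_nil], by simpa [pvSolveB] using hm⟩
  | succ f ih =>
    intro memo cs hm hlen
    rcases cs with _ | ⟨x, t⟩
    · exact ⟨by simp [pvSolveB, pvSolveP_nil], by simpa [pvSolveB] using hm⟩
    rcases hget : PySem.Dict.get? memo (x :: t) with _ | r
    case some =>
      have hr := hm _ _ hget
      constructor
      · simp only [pvSolveB, List.isEmpty_cons, Bool.false_eq_true, if_false, hget]
        rw [hr]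
        exact pvSolveP_fuel _ _ _ le_rfl hlen
      · simp only [pvSolveB, List.isEmpty_cons, Bool.false_eq_true, if_false, hget]
        exact hm
    case none =>
      have hmd : pvMinPair (x :: t) ∈ x :: t := pvMinPair_mem (by simp)
      have hlene : ∀ m2 : Int × Int,
          (((x :: t).erase (pvMinPair (x :: t))).erase m2).length ≤ f := by
        intro m2
        have he1 : ((x :: t).erase (pvMinPair (x :: t))).length = t.length := by
          rw [List.length_erase_of_mem hmd]; simp
        have h2 := List.length_erase_le (l := (x :: t).erase (pvMinPair (x :: t))) (a := m2)
        simp only [List.length_cons] at hlen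
        omega
      have hins : ∀ (d : PySem.Dict (List (Int × Int)) Bool) (v : Bool),
          pvMemoOK d → v = pvSolveP (f + 1) (x :: t) → pvMemoOK (d.insert (x :: t) v) := by
        intro d v hd hv cs' r' hg
        rw [PySem.Dict.get?_insert] at hg
        split_ifs at hg with hcs
        · subst hcs
          obtain rfl := Option.some.inj hg
          rw [hv]
          exact pvSolveP_fuel _ _ _ hlen le_rfl
        · exact hd _ _ hg
      simp only [pvSolveB, List.isEmpty_cons, Bool.false_eq_true, if_false, hget,
        pvSolveP]
      by_cases hc1 : (x :: t).contains ((pvMinPair (x :: t)).1 + 1, (pvMinPair (x :: t)).2) = true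
      · obtain ⟨ih1, ihm1⟩ := ih memo
          (((x :: t).erase (pvMinPair (x :: t))).erase
            ((pvMinPair (x :: t)).1 + 1, (pvMinPair (x :: t)).2)) hm (hlene _)
        rw [hc1, if_pos rfl, ih1]
        cases hv1 : pvSolveP f (((x :: t).erase (pvMinPair (x :: t))).erase
            ((pvMinPair (x :: t)).1 + 1, (pvMinPair (x :: t)).2))
        · -- down recursion failed: fall through to the right branch
          rw [if_neg (by simp)]
          simp only [Bool.and_false, Bool.false_or]
          by_cases hc2 : (x :: t).contains ((pvMinPair (x :: t)).1, (pvMinPair (x :: t)).2 + 1) = true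
          · obtain ⟨ih2, ihm2⟩ := ih _
              (((x :: t).erase (pvMinPair (x :: t))).erase
                ((pvMinPair (x :: t)).1, (pvMinPair (x :: t)).2 + 1)) ihm1 (hlene _)
            rw [hc2, if_pos rfl, ih2]
            refine ⟨by simp, ?_⟩
            refine hins _ _ ihm2 ?_
            simp only [pvSolveP, hc1, hv1, hc2]
            simp
          · rw [Bool.not_eq_true] at hc2
            rw [hc2, if_neg (by simp)]
            refine ⟨by simp, ?_⟩
            refine hins _ _ ihm1 ?_
            simp only [pvSolveP, hc1, hv1, hc2]
            simp
        · -- down recursion succeeded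
          rw [if_pos (by simp)]
          refine ⟨by simp, ?_⟩
          refine hins _ _ ihm1 ?_
          simp only [pvSolveP, hc1, hv1]
          simp
      · rw [Bool.not_eq_true] at hc1
        rw [hc1, if_neg (by simp)]
        simp only [Bool.false_eq_true, if_false, Bool.false_and, Bool.false_or]
        by_cases hc2 : (x :: t).contains ((pvMinPair (x :: t)).1, (pvMinPair (x :: t)).2 + 1) = true
        · obtain ⟨ih2, ihm2⟩ := ih memo
            (((x :: t).erase (pvMinPair (x :: t))).erase
              ((pvMinPair (x :: t)).1, (pvMinPair (x :: t)).2 + 1)) hm (hlene _)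
          rw [hc2, if_pos rfl, ih2]
          refine ⟨by simp, ?_⟩
          refine hins _ _ ihm2 ?_
          simp only [pvSolveP, hc1, hc2]
          simp
        · rw [Bool.not_eq_true] at hc2
          rw [hc2, if_neg (by simp)]
          refine ⟨by simp, ?_⟩
          refine hins _ _ hm ?_
          simp only [pvSolveP, hc1, hc2]
          simp

-- --- assembling the two ports ---

lemma can_tile_alt_eq (grid : List (List Int)) :
    can_tile_alt grid = pvSolveP (pvCellsRaw grid).length (pvCellsRaw grid) := by
  unfold can_tile_alt
  rw [pvCells_eq]
  have hempty : pvMemoOK PySem.Dict.empty := by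
    intro cs r h
    rw [PySem.Dict.get?_empty] at h
    cases h
  exact (solveB_ok _ _ _ hempty le_rfl).1

-- ===== VERDICT (by name: the statement is the Claim_ definition above) =====
theorem can_tile_spec : Claim_equal_can_tile := by
  intro grid _ hpre
  unfold Spec_can_tile can_tile
  rw [bridge _ grid hpre (cells_length_lt hpre), can_tile_alt_eq]
  refine pvSolveP_fuel _ _ _ ?_ le_rfl
  have := cells_length_lt hpre
  omega
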